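-- pv_equiv track=rewrite | github.com/plantprelude/gradsleuth.js | bio-match-ml/src/search/biology_knowledge.py | normalize_organism_name
-- ===== SOURCE A (Python) =====
-- from typing import List, Dict, Set, Optional
--
-- ORGANISM_MAPPINGS = {
--     'mouse': ['Mus musculus', 'mice', 'murine'],
--     'rat': ['Rattus norvegicus', 'rats'],
--     'human': ['Homo sapiens', 'humans', 'clinical', 'patient'],
--     'fly': ['Drosophila melanogaster', 'fruit fly', 'drosophila', 'flies'],
--     'worm': ['C. elegans', 'Caenorhabditis elegans', 'nematode', 'worms'],
--     'zebrafish': ['Danio rerio', 'zebra fish', 'danio'],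
--     'yeast': ['Saccharomyces cerevisiae', 'S. cerevisiae', 'budding yeast'],
--     'fission yeast': ['Schizosaccharomyces pombe', 'S. pombe'],
--     'e. coli': ['Escherichia coli', 'E. coli', 'bacteria'],
--     'arabidopsis': ['Arabidopsis thaliana', 'A. thaliana', 'thale cress'],
--     'xenopus': ['Xenopus laevis', 'african clawed frog', 'frog'],
--     'chicken': ['Gallus gallus', 'chick'],
--     'pig': ['Sus scrofa', 'porcine', 'swine'],
--     'monkey': ['macaque', 'rhesus', 'primate', 'non-human primate', 'NHP']
-- }
--
-- def normalize_organism_name(organism: str) -> Dict[str, str]: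
--     """
--     Normalize organism name to standard format
--
--     Args:
--         organism: Common or scientific name
--
--     Returns:
--         Dictionary with common_name, scientific_name, taxonomy_id
--     """
--     organism_lower = organism.lower().strip()
--
--     # Mapping of organism data
--     organism_data = {
--         'mouse': {'common': 'Mouse', 'scientific': 'Mus musculus', 'taxid': '10090'},
--         'rat': {'common': 'Rat', 'scientific': 'Rattus norvegicus', 'taxid': '10116'},
--         'human': {'common': 'Human', 'scientific': 'Homo sapiens', 'taxid': '9606'},
--         'fly': {'common': 'Fruit fly', 'scientific': 'Drosophila melanogaster', 'taxid': '7227'},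
--         'worm': {'common': 'C. elegans', 'scientific': 'Caenorhabditis elegans', 'taxid': '6239'},
--         'zebrafish': {'common': 'Zebrafish', 'scientific': 'Danio rerio', 'taxid': '7955'},
--         'yeast': {'common': 'Yeast', 'scientific': 'Saccharomyces cerevisiae', 'taxid': '4932'},
--         'e. coli': {'common': 'E. coli', 'scientific': 'Escherichia coli', 'taxid': '562'},
--         'arabidopsis': {'common': 'Arabidopsis', 'scientific': 'Arabidopsis thaliana', 'taxid': '3702'},
--         'xenopus': {'common': 'Xenopus', 'scientific': 'Xenopus laevis', 'taxid': '8355'},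
--         'chicken': {'common': 'Chicken', 'scientific': 'Gallus gallus', 'taxid': '9031'},
--         'pig': {'common': 'Pig', 'scientific': 'Sus scrofa', 'taxid': '9823'},
--         'monkey': {'common': 'Monkey', 'scientific': 'Macaca mulatta', 'taxid': '9544'}
--     }
--
--     # Try to find match
--     for key, data in organism_data.items():
--         if organism_lower in ORGANISM_MAPPINGS.get(key, []) or organism_lower == key:
--             return {
--                 'common_name': data['common'],
--                 'scientific_name': data['scientific'],
--                 'taxonomy_id': data['taxid']
--             }
--
--     # If not found, return original
--     return {
--         'common_name': organism,
--         'scientific_name': organism,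
--         'taxonomy_id': 'unknown'
--     }
-- ===== SOURCE B (Python) =====
-- # B: one flat table of (record, names) rows indexed once into a reverse dict
-- # (setdefault: first row wins), so a call is a single lookup + dict(zip(...)).
--
-- _TABLE = [
--     (('Mouse', 'Mus musculus', '10090'), ['mouse', 'Mus musculus', 'mice', 'murine']),
--     (('Rat', 'Rattus norvegicus', '10116'), ['rat', 'Rattus norvegicus', 'rats']),
--     (('Human', 'Homo sapiens', '9606'), ['human', 'Homo sapiens', 'humans', 'clinical', 'patient']),
--     (('Fruit fly', 'Drosophila melanogaster', '7227'), ['fly', 'Drosophila melanogaster', 'fruit fly', 'drosophila', 'flies']),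
--     (('C. elegans', 'Caenorhabditis elegans', '6239'), ['worm', 'C. elegans', 'Caenorhabditis elegans', 'nematode', 'worms']),
--     (('Zebrafish', 'Danio rerio', '7955'), ['zebrafish', 'Danio rerio', 'zebra fish', 'danio']),
--     (('Yeast', 'Saccharomyces cerevisiae', '4932'), ['yeast', 'Saccharomyces cerevisiae', 'S. cerevisiae', 'budding yeast']),
--     (('E. coli', 'Escherichia coli', '562'), ['e. coli', 'Escherichia coli', 'E. coli', 'bacteria']),
--     (('Arabidopsis', 'Arabidopsis thaliana', '3702'), ['arabidopsis', 'Arabidopsis thaliana', 'A. thaliana', 'thale cress']),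
--     (('Xenopus', 'Xenopus laevis', '8355'), ['xenopus', 'Xenopus laevis', 'african clawed frog', 'frog']),
--     (('Chicken', 'Gallus gallus', '9031'), ['chicken', 'Gallus gallus', 'chick']),
--     (('Pig', 'Sus scrofa', '9823'), ['pig', 'Sus scrofa', 'porcine', 'swine']),
--     (('Monkey', 'Macaca mulatta', '9544'), ['monkey', 'macaque', 'rhesus', 'primate', 'non-human primate', 'NHP']),
-- ]
--
-- _INDEX = {}
-- for _rec, _names in _TABLE:
--     for _n in _names:
--         _INDEX.setdefault(_n, _rec)
--
--
-- def normalize_organism_name(organism: str) -> dict: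
--     q = organism.lower().strip()
--     rec = _INDEX.get(q)
--     if rec is None:
--         rec = (organism, organism, 'unknown')
--     return dict(zip(('common_name', 'scientific_name', 'taxonomy_id'), rec))
-- ===== Notes on version B (the rewrite author's own statement) =====
-- stated objective: idiomatic
-- what changed: Replaces A's per-call linear scan over organism_data (with an alias-list membership test per entry, consulting ORGANISM_MAPPINGS) by a single flat (record, names) table indexed once at module load into a reverse-lookup dict via setdefault (first row wins), so each call is one dict lookup and a dict(zip(...)) construction.
import Mathlib
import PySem

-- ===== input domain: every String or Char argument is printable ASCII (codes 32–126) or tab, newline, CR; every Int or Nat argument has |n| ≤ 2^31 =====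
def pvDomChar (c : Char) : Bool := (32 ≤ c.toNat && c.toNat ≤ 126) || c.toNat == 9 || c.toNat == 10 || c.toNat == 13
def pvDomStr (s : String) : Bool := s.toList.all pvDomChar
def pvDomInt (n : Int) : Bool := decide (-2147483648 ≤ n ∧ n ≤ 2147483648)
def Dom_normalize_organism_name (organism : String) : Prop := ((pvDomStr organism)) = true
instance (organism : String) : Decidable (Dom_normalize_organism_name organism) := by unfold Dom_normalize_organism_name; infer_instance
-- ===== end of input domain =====

-- B replaces A's per-call scan over organism_data (with an alias-list membership
-- test per entry) by one flat (record, names) table indexed once into a reverse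
-- dict, so each call is a single lookup plus dict(zip(...)).

-- ===== PORT A =====
def ORGANISM_MAPPINGS : PySem.Dict String (List String) := PySem.Dict.ofList [
  ("mouse", ["Mus musculus", "mice", "murine"]),
  ("rat", ["Rattus norvegicus", "rats"]),
  ("human", ["Homo sapiens", "humans", "clinical", "patient"]),
  ("fly", ["Drosophila melanogaster", "fruit fly", "drosophila", "flies"]),
  ("worm", ["C. elegans", "Caenorhabditis elegans", "nematode", "worms"]),
  ("zebrafish", ["Danio rerio", "zebra fish", "danio"]),
  ("yeast", ["Saccharomyces cerevisiae", "S. cerevisiae", "budding yeast"]),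
  ("fission yeast", ["Schizosaccharomyces pombe", "S. pombe"]),
  ("e. coli", ["Escherichia coli", "E. coli", "bacteria"]),
  ("arabidopsis", ["Arabidopsis thaliana", "A. thaliana", "thale cress"]),
  ("xenopus", ["Xenopus laevis", "african clawed frog", "frog"]),
  ("chicken", ["Gallus gallus", "chick"]),
  ("pig", ["Sus scrofa", "porcine", "swine"]),
  ("monkey", ["macaque", "rhesus", "primate", "non-human primate", "NHP"])]

-- organism_data, in A's literal order: key ↦ (common, scientific, taxid)
def pvOrganismData : List (String × (String × String × String)) := [
  ("mouse", ("Mouse", "Mus musculus", "10090")),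
  ("rat", ("Rat", "Rattus norvegicus", "10116")),
  ("human", ("Human", "Homo sapiens", "9606")),
  ("fly", ("Fruit fly", "Drosophila melanogaster", "7227")),
  ("worm", ("C. elegans", "Caenorhabditis elegans", "6239")),
  ("zebrafish", ("Zebrafish", "Danio rerio", "7955")),
  ("yeast", ("Yeast", "Saccharomyces cerevisiae", "4932")),
  ("e. coli", ("E. coli", "Escherichia coli", "562")),
  ("arabidopsis", ("Arabidopsis", "Arabidopsis thaliana", "3702")),
  ("xenopus", ("Xenopus", "Xenopus laevis", "8355")),
  ("chicken", ("Chicken", "Gallus gallus", "9031")),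
  ("pig", ("Pig", "Sus scrofa", "9823")),
  ("monkey", ("Monkey", "Macaca mulatta", "9544"))]

-- A's 'for key, data in organism_data.items(): if … return …' loop
def pvScanA (s : String) : List (String × (String × String × String)) → Option (String × String × String)
  | [] => none
  | (k, d) :: rest =>
      if (PySem.Dict.getD ORGANISM_MAPPINGS k []).contains s || s == k then some d
      else pvScanA s rest

def normalize_organism_name (organism : String) : List (String × String) :=
  let organism_lower := PySem.Str.strip (PySem.Str.lower organism)
  match pvScanA organism_lower pvOrganismData with
  | some (c, sci, tax) =>
      [("common_name", c), ("scientific_name", sci), ("taxonomy_id", tax)]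
  | none =>
      [("common_name", organism), ("scientific_name", organism), ("taxonomy_id", "unknown")]

-- ===== PORT B =====
-- Source B's _TABLE: rows of (record, names), record = (common, scientific, taxid)
def pvTable : List ((String × String × String) × List String) := [
  (("Mouse", "Mus musculus", "10090"), ["mouse", "Mus musculus", "mice", "murine"]),
  (("Rat", "Rattus norvegicus", "10116"), ["rat", "Rattus norvegicus", "rats"]),
  (("Human", "Homo sapiens", "9606"), ["human", "Homo sapiens", "humans", "clinical", "patient"]),
  (("Fruit fly", "Drosophila melanogaster", "7227"), ["fly", "Drosophila melanogaster", "fruit fly", "drosophila", "flies"]),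
  (("C. elegans", "Caenorhabditis elegans", "6239"), ["worm", "C. elegans", "Caenorhabditis elegans", "nematode", "worms"]),
  (("Zebrafish", "Danio rerio", "7955"), ["zebrafish", "Danio rerio", "zebra fish", "danio"]),
  (("Yeast", "Saccharomyces cerevisiae", "4932"), ["yeast", "Saccharomyces cerevisiae", "S. cerevisiae", "budding yeast"]),
  (("E. coli", "Escherichia coli", "562"), ["e. coli", "Escherichia coli", "E. coli", "bacteria"]),
  (("Arabidopsis", "Arabidopsis thaliana", "3702"), ["arabidopsis", "Arabidopsis thaliana", "A. thaliana", "thale cress"]),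
  (("Xenopus", "Xenopus laevis", "8355"), ["xenopus", "Xenopus laevis", "african clawed frog", "frog"]),
  (("Chicken", "Gallus gallus", "9031"), ["chicken", "Gallus gallus", "chick"]),
  (("Pig", "Sus scrofa", "9823"), ["pig", "Sus scrofa", "porcine", "swine"]),
  (("Monkey", "Macaca mulatta", "9544"), ["monkey", "macaque", "rhesus", "primate", "non-human primate", "NHP"])]

-- Source B's _INDEX: setdefault over every name of every row (first row wins)
def pvIndex : PySem.Dict String (String × String × String) :=
  pvTable.foldl
    (fun d row =>
      row.2.foldl (fun d' n => if d'.contains n then d' else d'.insert n row.1) d)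
    PySem.Dict.empty

def normalize_organism_name_alt (organism : String) : List (String × String) :=
  let q := PySem.Str.strip (PySem.Str.lower organism)
  let r := (PySem.Dict.get? pvIndex q).getD (organism, organism, "unknown")
  List.zip ["common_name", "scientific_name", "taxonomy_id"] [r.1, r.2.1, r.2.2]

-- ===== PRECONDITION & SPEC =====
def Spec_normalize_organism_name (organism : String) (out : List (String × String)) : Prop := out = normalize_organism_name_alt organism
instance (organism : String) (out : List (String × String)) : Decidable (Spec_normalize_organism_name organism out) := by unfold Spec_normalize_organism_name; infer_instance

-- ===== CLAIM (what is proved, stated in full; the proofs are below) =====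
def Claim_equal_normalize_organism_name : Prop := ∀ (organism : String), Dom_normalize_organism_name organism → Spec_normalize_organism_name organism (normalize_organism_name organism)

-- ===== LEMMAS AND PROOFS =====
-- proof-only helper: the 55 strings indexed by B's dict (= all strings A's scan tests)
def pvNames : List String := ["mouse", "Mus musculus", "mice", "murine", "rat", "Rattus norvegicus", "rats", "human", "Homo sapiens", "humans", "clinical", "patient", "fly", "Drosophila melanogaster", "fruit fly", "drosophila", "flies", "worm", "C. elegans", "Caenorhabditis elegans", "nematode", "worms", "zebrafish", "Danio rerio", "zebra fish", "danio", "yeast", "Saccharomyces cerevisiae", "S. cerevisiae", "budding yeast", "e. coli", "Escherichia coli", "E. coli", "bacteria", "arabidopsis", "Arabidopsis thaliana", "A. thaliana", "thale cress", "xenopus", "Xenopus laevis", "african clawed frog", "frog", "chicken", "Gallus gallus", "chick", "pig", "Sus scrofa", "porcine", "swine", "monkey", "macaque", "rhesus", "primate", "non-human primate", "NHP"]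

-- B's precomputed index, evaluated to its literal association list
set_option maxRecDepth 16384 in
lemma pvIndex_eq : pvIndex = PySem.Dict.mk [
  ("mouse", ("Mouse", "Mus musculus", "10090")),
  ("Mus musculus", ("Mouse", "Mus musculus", "10090")),
  ("mice", ("Mouse", "Mus musculus", "10090")),
  ("murine", ("Mouse", "Mus musculus", "10090")),
  ("rat", ("Rat", "Rattus norvegicus", "10116")),
  ("Rattus norvegicus", ("Rat", "Rattus norvegicus", "10116")),
  ("rats", ("Rat", "Rattus norvegicus", "10116")),
  ("human", ("Human", "Homo sapiens", "9606")),
  ("Homo sapiens", ("Human", "Homo sapiens", "9606")),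
  ("humans", ("Human", "Homo sapiens", "9606")),
  ("clinical", ("Human", "Homo sapiens", "9606")),
  ("patient", ("Human", "Homo sapiens", "9606")),
  ("fly", ("Fruit fly", "Drosophila melanogaster", "7227")),
  ("Drosophila melanogaster", ("Fruit fly", "Drosophila melanogaster", "7227")),
  ("fruit fly", ("Fruit fly", "Drosophila melanogaster", "7227")),
  ("drosophila", ("Fruit fly", "Drosophila melanogaster", "7227")),
  ("flies", ("Fruit fly", "Drosophila melanogaster", "7227")),
  ("worm", ("C. elegans", "Caenorhabditis elegans", "6239")),
  ("C. elegans", ("C. elegans", "Caenorhabditis elegans", "6239")),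
  ("Caenorhabditis elegans", ("C. elegans", "Caenorhabditis elegans", "6239")),
  ("nematode", ("C. elegans", "Caenorhabditis elegans", "6239")),
  ("worms", ("C. elegans", "Caenorhabditis elegans", "6239")),
  ("zebrafish", ("Zebrafish", "Danio rerio", "7955")),
  ("Danio rerio", ("Zebrafish", "Danio rerio", "7955")),
  ("zebra fish", ("Zebrafish", "Danio rerio", "7955")),
  ("danio", ("Zebrafish", "Danio rerio", "7955")),
  ("yeast", ("Yeast", "Saccharomyces cerevisiae", "4932")),
  ("Saccharomyces cerevisiae", ("Yeast", "Saccharomyces cerevisiae", "4932")),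
  ("S. cerevisiae", ("Yeast", "Saccharomyces cerevisiae", "4932")),
  ("budding yeast", ("Yeast", "Saccharomyces cerevisiae", "4932")),
  ("e. coli", ("E. coli", "Escherichia coli", "562")),
  ("Escherichia coli", ("E. coli", "Escherichia coli", "562")),
  ("E. coli", ("E. coli", "Escherichia coli", "562")),
  ("bacteria", ("E. coli", "Escherichia coli", "562")),
  ("arabidopsis", ("Arabidopsis", "Arabidopsis thaliana", "3702")),
  ("Arabidopsis thaliana", ("Arabidopsis", "Arabidopsis thaliana", "3702")),
  ("A. thaliana", ("Arabidopsis", "Arabidopsis thaliana", "3702")),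
  ("thale cress", ("Arabidopsis", "Arabidopsis thaliana", "3702")),
  ("xenopus", ("Xenopus", "Xenopus laevis", "8355")),
  ("Xenopus laevis", ("Xenopus", "Xenopus laevis", "8355")),
  ("african clawed frog", ("Xenopus", "Xenopus laevis", "8355")),
  ("frog", ("Xenopus", "Xenopus laevis", "8355")),
  ("chicken", ("Chicken", "Gallus gallus", "9031")),
  ("Gallus gallus", ("Chicken", "Gallus gallus", "9031")),
  ("chick", ("Chicken", "Gallus gallus", "9031")),
  ("pig", ("Pig", "Sus scrofa", "9823")),
  ("Sus scrofa", ("Pig", "Sus scrofa", "9823")),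
  ("porcine", ("Pig", "Sus scrofa", "9823")),
  ("swine", ("Pig", "Sus scrofa", "9823")),
  ("monkey", ("Monkey", "Macaca mulatta", "9544")),
  ("macaque", ("Monkey", "Macaca mulatta", "9544")),
  ("rhesus", ("Monkey", "Macaca mulatta", "9544")),
  ("primate", ("Monkey", "Macaca mulatta", "9544")),
  ("non-human primate", ("Monkey", "Macaca mulatta", "9544")),
  ("NHP", ("Monkey", "Macaca mulatta", "9544"))] := by rfl

-- core: A's scan and B's reverse-index lookup agree on every query string
set_option maxRecDepth 16384 in
set_option maxHeartbeats 1000000 in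
lemma pvScan_eq_lookup (s : String) :
    pvScanA s pvOrganismData = PySem.Dict.get? pvIndex s := by
  rw [pvIndex_eq]
  by_cases hs : s ∈ pvNames
  · fin_cases hs <;> decide
  · simp only [pvNames, List.mem_cons, List.not_mem_nil, or_false] at hs
    push Not at hs
    obtain ⟨h1, h2, h3, h4, h5, h6, h7, h8, h9, h10, h11, h12, h13, h14, h15, h16, h17, h18, h19, h20, h21, h22, h23, h24, h25, h26, h27, h28, h29, h30, h31, h32, h33, h34, h35, h36, h37, h38, h39, h40, h41, h42, h43, h44, h45, h46, h47, h48, h49, h50, h51, h52, h53, h54, h55⟩ := hs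
    simp only [pvScanA, pvOrganismData]
    rw [show PySem.Dict.getD ORGANISM_MAPPINGS "mouse" [] = ["Mus musculus", "mice", "murine"] from rfl]
    rw [show PySem.Dict.getD ORGANISM_MAPPINGS "rat" [] = ["Rattus norvegicus", "rats"] from rfl]
    rw [show PySem.Dict.getD ORGANISM_MAPPINGS "human" [] = ["Homo sapiens", "humans", "clinical", "patient"] from rfl]
    rw [show PySem.Dict.getD ORGANISM_MAPPINGS "fly" [] = ["Drosophila melanogaster", "fruit fly", "drosophila", "flies"] from rfl]
    rw [show PySem.Dict.getD ORGANISM_MAPPINGS "worm" [] = ["C. elegans", "Caenorhabditis elegans", "nematode", "worms"] from rfl]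
    rw [show PySem.Dict.getD ORGANISM_MAPPINGS "zebrafish" [] = ["Danio rerio", "zebra fish", "danio"] from rfl]
    rw [show PySem.Dict.getD ORGANISM_MAPPINGS "yeast" [] = ["Saccharomyces cerevisiae", "S. cerevisiae", "budding yeast"] from rfl]
    rw [show PySem.Dict.getD ORGANISM_MAPPINGS "e. coli" [] = ["Escherichia coli", "E. coli", "bacteria"] from rfl]
    rw [show PySem.Dict.getD ORGANISM_MAPPINGS "arabidopsis" [] = ["Arabidopsis thaliana", "A. thaliana", "thale cress"] from rfl]
    rw [show PySem.Dict.getD ORGANISM_MAPPINGS "xenopus" [] = ["Xenopus laevis", "african clawed frog", "frog"] from rfl]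
    rw [show PySem.Dict.getD ORGANISM_MAPPINGS "chicken" [] = ["Gallus gallus", "chick"] from rfl]
    rw [show PySem.Dict.getD ORGANISM_MAPPINGS "pig" [] = ["Sus scrofa", "porcine", "swine"] from rfl]
    rw [show PySem.Dict.getD ORGANISM_MAPPINGS "monkey" [] = ["macaque", "rhesus", "primate", "non-human primate", "NHP"] from rfl]
    simp only [PySem.Dict.get?_mk_cons, List.contains_eq_mem, List.mem_cons,
      List.not_mem_nil, or_false, Bool.decide_or]
    simp only [decide_eq_false h2, decide_eq_false h3, decide_eq_false h4, decide_eq_false h6, decide_eq_false h7, decide_eq_false h9, decide_eq_false h10, decide_eq_false h11, decide_eq_false h12, decide_eq_false h14, decide_eq_false h15, decide_eq_false h16, decide_eq_false h17, decide_eq_false h19, decide_eq_false h20, decide_eq_false h21, decide_eq_false h22, decide_eq_false h24, decide_eq_false h25, decide_eq_false h26, decide_eq_false h28, decide_eq_false h29, decide_eq_false h30, decide_eq_false h32, decide_eq_false h33, decide_eq_false h34, decide_eq_false h36, decide_eq_false h37, decide_eq_false h38, decide_eq_false h40, decide_eq_false h41, decide_eq_false h42, decide_eq_false h44, decide_eq_false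 h45, decide_eq_false h47, decide_eq_false h48, decide_eq_false h49, decide_eq_false h51, decide_eq_false h52, decide_eq_false h53, decide_eq_false h54, decide_eq_false h55, beq_eq_false_iff_ne.mpr h1, beq_eq_false_iff_ne.mpr h5, beq_eq_false_iff_ne.mpr h8, beq_eq_false_iff_ne.mpr h13, beq_eq_false_iff_ne.mpr h18, beq_eq_false_iff_ne.mpr h23, beq_eq_false_iff_ne.mpr h27, beq_eq_false_iff_ne.mpr h31, beq_eq_false_iff_ne.mpr h35, beq_eq_false_iff_ne.mpr h39, beq_eq_false_iff_ne.mpr h43, beq_eq_false_iff_ne.mpr h46, beq_eq_false_iff_ne.mpr h50, beq_eq_false_iff_ne.mpr (Ne.symm h1), beq_eq_false_iff_ne.mpr (Ne.symm h2), beq_eq_false_iff_ne.mpr (Ne.symm h3), beq_eq_false_iff_ne.mpr (Ne.symm h4), beq_eq_false_iff_ne.mpr (Ne.symm h5), beq_eq_false_iff_ne.mpr (Ne.symm h6), beq_eq_false_iff_ne.mpr (Ne.symm h7), beq_eq_false_iff_ne.mpr (Ne.symm h8), beq_eq_false_iff_ne.mpr (Ne.symm h9), beq_eq_false_iff_ne.mpr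 (Ne.symm h10), beq_eq_false_iff_ne.mpr (Ne.symm h11), beq_eq_false_iff_ne.mpr (Ne.symm h12), beq_eq_false_iff_ne.mpr (Ne.symm h13), beq_eq_false_iff_ne.mpr (Ne.symm h14), beq_eq_false_iff_ne.mpr (Ne.symm h15), beq_eq_false_iff_ne.mpr (Ne.symm h16), beq_eq_false_iff_ne.mpr (Ne.symm h17), beq_eq_false_iff_ne.mpr (Ne.symm h18), beq_eq_false_iff_ne.mpr (Ne.symm h19), beq_eq_false_iff_ne.mpr (Ne.symm h20), beq_eq_false_iff_ne.mpr (Ne.symm h21), beq_eq_false_iff_ne.mpr (Ne.symm h22), beq_eq_false_iff_ne.mpr (Ne.symm h23), beq_eq_false_iff_ne.mpr (Ne.symm h24), beq_eq_false_iff_ne.mpr (Ne.symm h25), beq_eq_false_iff_ne.mpr (Ne.symm h26), beq_eq_false_iff_ne.mpr (Ne.symm h27), beq_eq_false_iff_ne.mpr (Ne.symm h28), beq_eq_false_iff_ne.mpr (Ne.symm h29), beq_eq_false_iff_ne.mpr (Ne.symm h30), beq_eq_false_iff_ne.mpr (Ne.symm h31), beq_eq_false_iff_ne.mpr (Ne.symm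 h32), beq_eq_false_iff_ne.mpr (Ne.symm h33), beq_eq_false_iff_ne.mpr (Ne.symm h34), beq_eq_false_iff_ne.mpr (Ne.symm h35), beq_eq_false_iff_ne.mpr (Ne.symm h36), beq_eq_false_iff_ne.mpr (Ne.symm h37), beq_eq_false_iff_ne.mpr (Ne.symm h38), beq_eq_false_iff_ne.mpr (Ne.symm h39), beq_eq_false_iff_ne.mpr (Ne.symm h40), beq_eq_false_iff_ne.mpr (Ne.symm h41), beq_eq_false_iff_ne.mpr (Ne.symm h42), beq_eq_false_iff_ne.mpr (Ne.symm h43), beq_eq_false_iff_ne.mpr (Ne.symm h44), beq_eq_false_iff_ne.mpr (Ne.symm h45), beq_eq_false_iff_ne.mpr (Ne.symm h46), beq_eq_false_iff_ne.mpr (Ne.symm h47), beq_eq_false_iff_ne.mpr (Ne.symm h48), beq_eq_false_iff_ne.mpr (Ne.symm h49), beq_eq_false_iff_ne.mpr (Ne.symm h50), beq_eq_false_iff_ne.mpr (Ne.symm h51), beq_eq_false_iff_ne.mpr (Ne.symm h52), beq_eq_false_iff_ne.mpr (Ne.symm h53), beq_eq_false_iff_ne.mpr (Ne.symm h54), beq_eq_false_iff_ne.mpr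 (Ne.symm h55), Bool.or_self, Bool.false_eq_true, if_false]
    rfl

-- ===== VERDICT (by name: the statement is the Claim_ definition above) =====
theorem normalize_organism_name_spec : Claim_equal_normalize_organism_name := by
  intro organism _
  unfold Spec_normalize_organism_name
  simp only [normalize_organism_name, normalize_organism_name_alt, pvScan_eq_lookup]
  cases PySem.Dict.get? pvIndex (PySem.Str.strip (PySem.Str.lower organism)) with
  | none => rfl
  | some r => rfl
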